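-- pv_equiv track=rewrite | github.com/carlosherrerao/N-Reinas-con-Algoritmos-Geneticos | AG_N_QUEENS.py | contar_Atacados
-- ===== SOURCE A (Python) =====
-- import copy
--
-- def contar_Atacados(matriz):
--     m= copy.deepcopy(matriz)
--     suma= 0
--     for i in range(len(m)):
--         for j in range(len(m[0])):
--             if m[i][j]==1:
--                 m[i][j]=0
--
--                 for k in range(len(m)):
--                     for l in range(len(m[0])):
--                         if k == i and l !=j:
--                             if m[k][l] == 1:
--                                 suma = suma+1
--                                 m[k][l] = 0
--                         if l == j and k != i:
--                             if m[k][l] == 1: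
--                                 suma = suma+1
--                                 m[k][l] = 0
--                         if ((k+l == i+j) or (k-l == i-j)):
--                             if m[k][l] == 1:
--                                 suma = suma+1
--                                 m[k][l] = 0
--
--     return suma
-- ===== SOURCE B (Python) =====
-- def contar_Atacados(matriz):
--     # One pass: a queen is a "pivot" iff no earlier pivot attacks it; A's removal
--     # scan counts exactly every queen that is not a pivot, so the answer is
--     # (number of queens) - (number of pivots).
--     total = 0
--     pivots = 0
--     rows = set()
--     cols = set()
--     diag1 = set()
--     diag2 = set()
--     ncols = len(matriz[0]) if matriz else 0
--     for i in range(len(matriz)):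
--         row = matriz[i]
--         for j in range(ncols):
--             if row[j] == 1:
--                 total += 1
--                 if i not in rows and j not in cols and (i + j) not in diag1 and (i - j) not in diag2:
--                     pivots += 1
--                     rows.add(i)
--                     cols.add(j)
--                     diag1.add(i + j)
--                     diag2.add(i - j)
--     return total - pivots
-- ===== Notes on version B (the rewrite author's own statement) =====
-- stated objective: faster
-- what changed: A repeatedly rescans and mutates the whole board for every queen found (four nested loops); B makes one pass, classifying each queen as a greedy 'pivot' via row/column/diagonal hash sets and returns queens minus pivots.
-- outside the precondition, e.g. on contar_Atacados([[1, 1], [1]]): A raises IndexError, B raises IndexError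
import Mathlib
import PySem

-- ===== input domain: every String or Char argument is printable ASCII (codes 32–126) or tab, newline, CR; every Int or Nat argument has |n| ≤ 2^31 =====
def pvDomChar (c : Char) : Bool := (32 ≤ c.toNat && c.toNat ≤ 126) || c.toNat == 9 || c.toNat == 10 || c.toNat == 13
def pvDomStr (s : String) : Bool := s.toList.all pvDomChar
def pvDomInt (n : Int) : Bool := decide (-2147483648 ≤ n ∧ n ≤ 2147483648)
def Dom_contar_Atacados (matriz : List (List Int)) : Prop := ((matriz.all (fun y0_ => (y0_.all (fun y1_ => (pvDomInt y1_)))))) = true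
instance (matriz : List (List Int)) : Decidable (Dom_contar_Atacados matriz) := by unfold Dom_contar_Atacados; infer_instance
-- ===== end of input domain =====

-- B replaces A's quartic rescan-and-remove with one greedy pass (queen count minus
-- pivot count, pivots indexed by row/col/diagonal sets); objective: faster.


-- ===== PORT A =====
-- m[k][l] read / 'm[k][l] = 0' write: loop indices come from range(len(m)) and
-- range(len(m[0])), so under Pre_ every access is in range and getD/set are exact.
-- len(m) / len(m[0]) of the mutated board equal matriz's dimensions (set preserves lengths).
def pvGetA (m : List (List Int)) (k l : Nat) : Int := (m.getD k []).getD l 0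
def pvZeroA (m : List (List Int)) (k l : Nat) : List (List Int) := m.set k ((m.getD k []).set l 0)

def contar_Atacados (matriz : List (List Int)) : Int :=
  ((List.range matriz.length).foldl (fun st i =>
    (List.range (matriz.headD []).length).foldl (fun st j =>
      if pvGetA st.1 i j = 1 then
        (List.range matriz.length).foldl (fun st k =>
          (List.range (matriz.headD []).length).foldl (fun st l =>
            let st1 := if k = i ∧ l ≠ j then
                (if pvGetA st.1 k l = 1 then (pvZeroA st.1 k l, st.2 + 1) else st) else st
            let st2 := if l = j ∧ k ≠ i then
                (if pvGetA st1.1 k l = 1 then (pvZeroA st1.1 k l, st1.2 + 1) else st1) else st1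
            if ((k : Int) + l = (i : Int) + j) ∨ ((k : Int) - l = (i : Int) - j) then
                (if pvGetA st2.1 k l = 1 then (pvZeroA st2.1 k l, st2.2 + 1) else st2) else st2)
          st) (pvZeroA st.1 i j, st.2)
      else st) st) (matriz, (0 : Int))).2

-- ===== PORT B =====
def contar_Atacados_alt (matriz : List (List Int)) : Int :=
  let ncols := if matriz.isEmpty then 0 else (matriz.headD []).length
  let st := (List.range matriz.length).foldl (fun st i =>
    let row := matriz.getD i []
    (List.range ncols).foldl (fun st j =>
      match st with
      | (total, pivots, rows, cols, diag1, diag2) =>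
        if row.getD j 0 = 1 then
          let total := total + 1
          if ¬ (PySem.Set.contains rows i = true) ∧ ¬ (PySem.Set.contains cols j = true)
              ∧ ¬ (PySem.Set.contains diag1 (i + j) = true)
              ∧ ¬ (PySem.Set.contains diag2 ((i : Int) - (j : Int)) = true) then
            (total, pivots + 1, PySem.Set.add rows i, PySem.Set.add cols j,
             PySem.Set.add diag1 (i + j), PySem.Set.add diag2 ((i : Int) - (j : Int)))
          else (total, pivots, rows, cols, diag1, diag2)
        else st) st)
    ((0 : Int), (0 : Int), (PySem.Set.empty : PySem.Set Nat), (PySem.Set.empty : PySem.Set Nat),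
     (PySem.Set.empty : PySem.Set Nat), (PySem.Set.empty : PySem.Set Int))
  st.1 - st.2.1

-- ===== PRECONDITION & SPEC =====
-- Pre_ excludes exactly the ragged matrices having a row shorter than row 0:
-- there A (and B) raise IndexError reading m[i][j].
def Pre_contar_Atacados (matriz : List (List Int)) : Prop :=
  ∀ row ∈ matriz, (matriz.headD []).length ≤ row.length
instance (matriz : List (List Int)) : Decidable (Pre_contar_Atacados matriz) := by
  unfold Pre_contar_Atacados; infer_instance

def pvWitness_contar_Atacados : List (List Int) := [[1, 0, 0], [0, 0, 1], [0, 1, 0]]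

def Spec_contar_Atacados (matriz : List (List Int)) (out : Int) : Prop := out = contar_Atacados_alt matriz
instance (matriz : List (List Int)) (out : Int) : Decidable (Spec_contar_Atacados matriz out) := by unfold Spec_contar_Atacados; infer_instance

-- ===== CLAIM (what is proved, stated in full; the proofs are below) =====
def Claim_equal_contar_Atacados : Prop := ∀ (matriz : List (List Int)), Dom_contar_Atacados matriz → Pre_contar_Atacados matriz → Spec_contar_Atacados matriz (contar_Atacados matriz)

-- ===== LEMMAS AND PROOFS =====

-- the value of the original (unmutated) matrix at a cell
def pvOrig (orig : List (List Int)) (q : Nat × Nat) : Int := pvGetA orig q.1 q.2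

-- 'p attacks q' exactly as A's three sequential conditions test it (p the pivot)
abbrev pvAtt (p q : Nat × Nat) : Prop :=
  (q.1 = p.1 ∧ q.2 ≠ p.2) ∨ (q.2 = p.2 ∧ q.1 ≠ p.1) ∨
  ((q.1 : Int) + q.2 = (p.1 : Int) + p.2) ∨ ((q.1 : Int) - q.2 = (p.1 : Int) - p.2)

abbrev pvAttB (P : List (Nat × Nat)) (q : Nat × Nat) : Prop := ∃ p ∈ P, pvAtt p q

-- all cells of the n×c grid in row-major order
def pvCells (n c : Nat) : List (Nat × Nat) :=
  (List.range n).flatMap (fun i => (List.range c).map (fun j => (i, j)))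

-- A's inner-loop body, per cell
def pvStep1 (i j : Nat) (st : List (List Int) × Int) (q : Nat × Nat) : List (List Int) × Int :=
  let k := q.1; let l := q.2
  let st1 := if k = i ∧ l ≠ j then
      (if pvGetA st.1 k l = 1 then (pvZeroA st.1 k l, st.2 + 1) else st) else st
  let st2 := if l = j ∧ k ≠ i then
      (if pvGetA st1.1 k l = 1 then (pvZeroA st1.1 k l, st1.2 + 1) else st1) else st1
  if ((k : Int) + l = (i : Int) + j) ∨ ((k : Int) - l = (i : Int) - j) then
      (if pvGetA st2.1 k l = 1 then (pvZeroA st2.1 k l, st2.2 + 1) else st2) else st2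

-- A's outer-loop body, per cell
def pvStepA (n c : Nat) (st : List (List Int) × Int) (q : Nat × Nat) : List (List Int) × Int :=
  if pvGetA st.1 q.1 q.2 = 1 then
    (pvCells n c).foldl (pvStep1 q.1 q.2) (pvZeroA st.1 q.1 q.2, st.2)
  else st

-- B's state and per-cell body
abbrev pvBState := Int × Int × PySem.Set Nat × PySem.Set Nat × PySem.Set Nat × PySem.Set Int

def pvStepB (orig : List (List Int)) (st : pvBState) (q : Nat × Nat) : pvBState :=
  match st with
  | (total, pivots, rows, cols, diag1, diag2) =>
    if pvOrig orig q = 1 then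
      let total := total + 1
      if ¬ (PySem.Set.contains rows q.1 = true) ∧ ¬ (PySem.Set.contains cols q.2 = true)
          ∧ ¬ (PySem.Set.contains diag1 (q.1 + q.2) = true)
          ∧ ¬ (PySem.Set.contains diag2 ((q.1 : Int) - (q.2 : Int)) = true) then
        (total, pivots + 1, PySem.Set.add rows q.1, PySem.Set.add cols q.2,
         PySem.Set.add diag1 (q.1 + q.2), PySem.Set.add diag2 ((q.1 : Int) - (q.2 : Int)))
      else (total, pivots, rows, cols, diag1, diag2)
    else st

-- greedy pivot accumulation, queen count, already-attacked count
def pvPiv (orig : List (List Int)) (P : List (Nat × Nat)) (L : List (Nat × Nat)) : List (Nat × Nat) :=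
  L.foldl (fun P q => if pvOrig orig q = 1 ∧ ¬ pvAttB P q then P ++ [q] else P) P
def pvQc (orig : List (List Int)) (L : List (Nat × Nat)) : Nat :=
  L.countP (fun q => decide (pvOrig orig q = 1))
def pvZc (orig : List (List Int)) (P : List (Nat × Nat)) (L : List (Nat × Nat)) : Nat :=
  L.countP (fun q => decide (pvOrig orig q = 1 ∧ pvAttB P q))

def pvShape (orig m : List (List Int)) : Prop :=
  m.length = orig.length ∧ ∀ k, (m.getD k []).length = (orig.getD k []).length

-- ---- generic small lemmas ----
theorem pvMem_cells (n c : Nat) (q : Nat × Nat) : q ∈ pvCells n c ↔ q.1 < n ∧ q.2 < c := by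
  simp only [pvCells, List.mem_flatMap, List.mem_map, List.mem_range]
  constructor
  · rintro ⟨i, hi, j, hj, rfl⟩; exact ⟨hi, hj⟩
  · rintro ⟨h1, h2⟩; exact ⟨q.1, h1, q.2, h2, rfl⟩

theorem pvNodup_cells (n c : Nat) : (pvCells n c).Nodup := by
  rw [pvCells, List.nodup_flatMap]
  constructor
  · intro x _; exact (List.nodup_range).map (fun a b h => by simpa using h)
  · refine List.Pairwise.imp ?_ (List.pairwise_lt_range (n := n))
    intro a b hab ⟨x1, x2⟩ hx hy
    simp only [List.mem_map, List.mem_range, Prod.mk.injEq] at hx hy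
    obtain ⟨j1, hj1, hx1, hx2⟩ := hx
    obtain ⟨j2, hj2, hy1, hy2⟩ := hy
    omega

theorem pvFold_cells {σ : Type} (n c : Nat) (f : σ → Nat → Nat → σ) (init : σ) :
    (List.range n).foldl (fun st i => (List.range c).foldl (fun st j => f st i j) st) init
      = (pvCells n c).foldl (fun st q => f st q.1 q.2) init := by
  simp [pvCells, List.foldl_flatMap, List.foldl_map]

theorem pvCountP_orb {α : Type} (l : List α) (p q : α → Bool) (h : ∀ a ∈ l, ¬(p a = true ∧ q a = true)) :
    l.countP (fun a => p a || q a) = l.countP p + l.countP q := by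
  induction l with
  | nil => simp
  | cons x xs ih =>
    simp only [List.countP_cons]
    rw [ih (fun a ha => h a (by simp [ha]))]
    have hx := h x (by simp)
    by_cases hp : p x = true <;> by_cases hq : q x = true <;> simp_all <;> omega

theorem pvCountP_sub {α : Type} (L1 L2 : List α) (pred p : α → Bool)
    (h1 : L1.Nodup) (h2 : L2.Nodup) (hsub : ∀ a ∈ L2, a ∈ L1)
    (hiff : ∀ a ∈ L1, pred a = true ↔ a ∈ L2 ∧ p a = true) :
    L1.countP pred = L2.countP p := by
  rw [List.countP_eq_length_filter, List.countP_eq_length_filter]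
  apply List.Perm.length_eq
  apply (List.perm_ext_iff_of_nodup (h1.filter _) (h2.filter _)).2
  intro a
  simp only [List.mem_filter]
  constructor
  · rintro ⟨ha, hp⟩; exact ((hiff a ha).1 hp)
  · rintro ⟨h, hp⟩; exact ⟨hsub a h, (hiff a (hsub a h)).2 ⟨h, hp⟩⟩

-- ---- board lemmas ----
theorem pvGetD_set {α : Type} (m : List α) (k k' : Nat) (r d : α) :
    (m.set k r).getD k' d = if k = k' ∧ k < m.length then r else m.getD k' d := by
  rw [List.getD_eq_getElem?_getD (l := m.set k r), List.getElem?_set]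
  by_cases h1 : k = k' <;> by_cases h2 : k < m.length <;>
    simp_all [List.getD_eq_getElem?_getD]
  by_cases h3 : k' < m.length <;> simp [h3]

theorem pvShape_zeroA (orig m : List (List Int)) (k l : Nat) (h : pvShape orig m) :
    pvShape orig (pvZeroA m k l) := by
  obtain ⟨h1, h2⟩ := h
  constructor
  · simp [pvZeroA, h1]
  · intro k'
    rw [pvZeroA, pvGetD_set]
    split
    · next hc => obtain ⟨rfl, _⟩ := hc; simpa using h2 k
    · exact h2 k' 

theorem pvGetA_zeroA_self (m : List (List Int)) (k l : Nat)
    (hk : k < m.length) (hl : l < (m.getD k []).length) :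
    pvGetA (pvZeroA m k l) k l = 0 := by
  rw [pvGetA, pvZeroA, pvGetD_set, if_pos ⟨rfl, hk⟩, pvGetD_set, if_pos ⟨rfl, hl⟩]

theorem pvGetA_zeroA_ne (m : List (List Int)) (k l k' l' : Nat) (h : (k', l') ≠ (k, l)) :
    pvGetA (pvZeroA m k l) k' l' = pvGetA m k' l' := by
  rw [pvGetA, pvGetA, pvZeroA, pvGetD_set]
  by_cases hk : k = k'
  · subst hk
    have hl' : l ≠ l' := by intro e; exact h (by rw [e])
    by_cases h2 : k < m.length
    · rw [if_pos ⟨rfl, h2⟩, pvGetD_set, if_neg (fun hc => hl' hc.1)]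
    · rw [if_neg (fun hc => h2 hc.2)]
  · rw [if_neg (fun hc => hk hc.1)]

-- ---- A-side characterizations ----
theorem pvAtt_self (p : Nat × Nat) : pvAtt p p := by
  right; right; left; rfl

theorem pvAttB_append (P : List (Nat × Nat)) (p q : Nat × Nat) :
    pvAttB (P ++ [p]) q ↔ pvAttB P q ∨ pvAtt p q := by
  simp [pvAttB, or_and_right, exists_or]

theorem pvStep1_eq (i j k l : Nat) (m : List (List Int)) (s : Int)
    (hk : k < m.length) (hl : l < (m.getD k []).length) :
    pvStep1 i j (m, s) (k, l) =
      if pvAtt (i, j) (k, l) ∧ pvGetA m k l = 1 then (pvZeroA m k l, s + 1) else (m, s) := by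
  have hz := pvGetA_zeroA_self m k l hk hl
  by_cases hg : pvGetA m k l = 1
  · by_cases h1 : k = i ∧ l ≠ j
    · have ha : pvAtt (i, j) (k, l) := Or.inl h1
      rw [if_pos ⟨ha, hg⟩]
      obtain ⟨rfl, hne⟩ := h1
      simp [pvStep1, hg, hne]
    · by_cases h2 : l = j ∧ k ≠ i
      · have ha : pvAtt (i, j) (k, l) := Or.inr (Or.inl h2)
        rw [if_pos ⟨ha, hg⟩]
        obtain ⟨rfl, hne⟩ := h2
        simp [pvStep1, hg, hne]
      · by_cases h3 : ((k : Int) + l = (i : Int) + j) ∨ ((k : Int) - l = (i : Int) - j)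
        · have ha : pvAtt (i, j) (k, l) := by
            rcases h3 with h | h
            exacts [Or.inr (Or.inr (Or.inl h)), Or.inr (Or.inr (Or.inr h))]
          rw [if_pos ⟨ha, hg⟩]; simp [pvStep1, h1, h2, h3, hg]
        · have ha : ¬ pvAtt (i, j) (k, l) := by
            rintro (h | h | h | h)
            exacts [h1 h, h2 h, h3 (Or.inl h), h3 (Or.inr h)]
          rw [if_neg (fun hc => ha hc.1)]; simp [pvStep1, h1, h2, h3]
  · rw [if_neg (fun hc => hg hc.2)]; simp [pvStep1, hg]

theorem pvStep1_run (i j : Nat) (L : List (Nat × Nat)) :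
    ∀ (m : List (List Int)) (s : Int), L.Nodup →
    (∀ q ∈ L, q.1 < m.length ∧ q.2 < (m.getD q.1 []).length) →
    (L.foldl (pvStep1 i j) (m, s)).2
        = s + (L.countP (fun q => decide (pvAtt (i, j) q ∧ pvGetA m q.1 q.2 = 1)) : Int)
    ∧ (∀ q : Nat × Nat, pvGetA (L.foldl (pvStep1 i j) (m, s)).1 q.1 q.2
        = if q ∈ L ∧ pvAtt (i, j) q ∧ pvGetA m q.1 q.2 = 1 then 0 else pvGetA m q.1 q.2)
    ∧ (L.foldl (pvStep1 i j) (m, s)).1.length = m.length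
    ∧ (∀ k, ((L.foldl (pvStep1 i j) (m, s)).1.getD k []).length = (m.getD k []).length) := by
  induction L with
  | nil =>
    intro m s _ _
    refine ⟨by simp, fun q => by simp, rfl, fun k => rfl⟩
  | cons q0 L ih =>
    intro m s hnd hb
    obtain ⟨k0, l0⟩ := q0
    obtain ⟨hk, hl⟩ := hb (k0, l0) (by simp)
    have hstep := pvStep1_eq i j k0 l0 m s hk hl
    have hsh := pvShape_zeroA m m k0 l0 ⟨rfl, fun _ => rfl⟩
    have hnotin : (k0, l0) ∉ L := (List.nodup_cons.1 hnd).1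
    rw [List.foldl_cons, hstep]
    by_cases hc : pvAtt (i, j) (k0, l0) ∧ pvGetA m k0 l0 = 1
    · rw [if_pos hc]
      have hz : pvGetA (pvZeroA m k0 l0) k0 l0 = 0 := pvGetA_zeroA_self m k0 l0 hk hl
      have hb' : ∀ q ∈ L, q.1 < (pvZeroA m k0 l0).length ∧ q.2 < ((pvZeroA m k0 l0).getD q.1 []).length := by
        intro q hq
        obtain ⟨h1, h2⟩ := hb q (by simp [hq])
        exact ⟨hsh.1 ▸ h1, (hsh.2 q.1) ▸ h2⟩
      obtain ⟨ihc, ihb, ihl, ihr⟩ := ih (pvZeroA m k0 l0) (s + 1) hnd.of_cons hb'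
      have hne : ∀ q ∈ L, pvGetA (pvZeroA m k0 l0) q.1 q.2 = pvGetA m q.1 q.2 := by
        intro q hq
        obtain ⟨a, b⟩ := q
        apply pvGetA_zeroA_ne
        intro he
        exact hnotin (he ▸ hq)
      refine ⟨?_, ?_, ?_, ?_⟩
      · rw [ihc, List.countP_cons]
        have hcnt : L.countP (fun q => decide (pvAtt (i, j) q ∧ pvGetA (pvZeroA m k0 l0) q.1 q.2 = 1))
             = L.countP (fun q => decide (pvAtt (i, j) q ∧ pvGetA m q.1 q.2 = 1)) := by
          apply List.countP_congr
          intro q hq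
          simp [hne q hq]
        rw [hcnt]
        simp [hc]
        ring
      · intro q
        rw [ihb q]
        by_cases hq0 : q = (k0, l0)
        · subst hq0
          simp [hnotin, hz, hc]
        · have hgq : pvGetA (pvZeroA m k0 l0) q.1 q.2 = pvGetA m q.1 q.2 := by
            obtain ⟨a, b⟩ := q
            apply pvGetA_zeroA_ne
            intro he
            exact hq0 he
          rw [hgq]
          simp only [List.mem_cons, hq0, false_or]
      · rw [ihl]; simp [pvZeroA]
      · intro k; rw [ihr k, hsh.2 k]
    · rw [if_neg hc]
      obtain ⟨ihc, ihb, ihl, ihr⟩ := ih m s hnd.of_cons (fun q hq => hb q (by simp [hq]))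
      refine ⟨?_, ?_, ihl, ihr⟩
      · rw [ihc, List.countP_cons]
        simp [hc]
      · intro q
        rw [ihb q]
        by_cases hq0 : q = (k0, l0)
        · subst hq0
          simp [hnotin, hc]
        · simp only [List.mem_cons, hq0, false_or]

theorem pvMain (orig : List (List Int)) (hpre : Pre_contar_Atacados orig) :
    ∀ (rest : List (Nat × Nat)) (P : List (Nat × Nat)) (m : List (List Int)) (s : Int),
    rest.Nodup →
    (∀ q ∈ rest, q.1 < orig.length ∧ q.2 < (orig.headD []).length) →
    pvShape orig m →
    (∀ q : Nat × Nat, q.1 < orig.length → q.2 < (orig.headD []).length →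
        pvGetA m q.1 q.2 = if pvOrig orig q = 1 ∧ pvAttB P q then 0 else pvOrig orig q) →
    (∀ q : Nat × Nat, q.1 < orig.length → q.2 < (orig.headD []).length → q ∉ rest →
        pvOrig orig q = 1 → pvAttB P q) →
    (rest.foldl (pvStepA orig.length (orig.headD []).length) (m, s)).2
        + ((pvPiv orig P rest).length : Int) + (pvZc orig P rest : Int)
      = s + (pvQc orig rest : Int) + (P.length : Int) := by
  have hrow : ∀ k, k < orig.length → (orig.headD []).length ≤ (orig.getD k []).length := by
    intro k hk
    rw [List.getD_eq_getElem _ _ hk]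
    exact hpre _ (List.getElem_mem hk)
  intro rest
  induction rest with
  | nil =>
    intro P m s _ _ _ _ _
    simp [pvPiv, pvZc, pvQc]
  | cons q0 rest ih =>
    intro P m s hnd hb hsh hchar hdone
    obtain ⟨i0, j0⟩ := q0
    obtain ⟨hi0, hj0⟩ := hb (i0, j0) (by simp)
    have hbm : i0 < m.length := hsh.1 ▸ hi0
    have hbr : j0 < (m.getD i0 []).length := lt_of_lt_of_le hj0 ((hsh.2 i0) ▸ hrow i0 hi0)
    have hq0notin : (i0, j0) ∉ rest := (List.nodup_cons.1 hnd).1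
    have hcq0 := hchar (i0, j0) hi0 hj0
    rw [List.foldl_cons]
    by_cases hg : pvGetA m i0 j0 = 1
    · -- pivot case: orig = 1 and not attacked by P
      have horig : pvOrig orig (i0, j0) = 1 := by
        by_cases h' : pvOrig orig (i0, j0) = 1 ∧ pvAttB P (i0, j0)
        · rw [hcq0, if_pos h'] at hg; exact absurd hg (by norm_num)
        · rwa [hcq0, if_neg h'] at hg
      have hnatt : ¬ pvAttB P (i0, j0) := by
        intro hatt
        rw [hcq0, if_pos ⟨horig, hatt⟩] at hg
        exact absurd hg (by norm_num)
      have hstep : pvStepA orig.length (orig.headD []).length (m, s) (i0, j0)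
          = (pvCells orig.length (orig.headD []).length).foldl (pvStep1 i0 j0) (pvZeroA m i0 j0, s) := by
        rw [pvStepA, if_pos hg]
      rw [hstep]
      set m0 := pvZeroA m i0 j0 with hm0def
      have hsh0 : pvShape orig m0 := pvShape_zeroA orig m i0 j0 hsh
      have hbnd0 : ∀ q ∈ pvCells orig.length (orig.headD []).length,
          q.1 < m0.length ∧ q.2 < (m0.getD q.1 []).length := by
        intro q hq
        obtain ⟨h1, h2⟩ := (pvMem_cells _ _ q).1 hq
        exact ⟨hsh0.1 ▸ h1, lt_of_lt_of_le h2 ((hsh0.2 q.1) ▸ hrow q.1 h1)⟩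
      obtain ⟨runc, runb, runl, runr⟩ :=
        pvStep1_run i0 j0 (pvCells orig.length (orig.headD []).length) m0 s
          (pvNodup_cells _ _) hbnd0
      -- value of m0 at a grid cell
      have hm0 : ∀ q : Nat × Nat, q.1 < orig.length → q.2 < (orig.headD []).length →
          pvGetA m0 q.1 q.2 = if q = (i0, j0) then 0
            else if pvOrig orig q = 1 ∧ pvAttB P q then 0 else pvOrig orig q := by
        intro q h1 h2
        by_cases hq : q = (i0, j0)
        · subst hq; rw [if_pos rfl, hm0def]; exact pvGetA_zeroA_self m i0 j0 hbm hbr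
        · rw [if_neg hq, hm0def, pvGetA_zeroA_ne m i0 j0 q.1 q.2
            (by obtain ⟨a, b⟩ := q; exact fun he => hq he), hchar q h1 h2]
      set P' := P ++ [(i0, j0)] with hP'def
      set st1 := (pvCells orig.length (orig.headD []).length).foldl (pvStep1 i0 j0) (m0, s) with hst1
      -- the counting predicate over the whole grid collapses to the unprocessed cells
      set newp : Nat × Nat → Bool :=
        (fun q => decide (pvOrig orig q = 1 ∧ ¬ pvAttB P q ∧ pvAtt (i0, j0) q)) with hnewp
      have hcnt : (pvCells orig.length (orig.headD []).length).countP
            (fun q => decide (pvAtt (i0, j0) q ∧ pvGetA m0 q.1 q.2 = 1))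
          = rest.countP newp := by
        apply pvCountP_sub _ _ _ _ (pvNodup_cells _ _) hnd.of_cons
          (fun q hq => (pvMem_cells _ _ q).2 (hb q (by simp [hq])))
        intro q hq
        obtain ⟨h1, h2⟩ := (pvMem_cells _ _ q).1 hq
        rw [hm0 q h1 h2, hnewp]
        simp only [decide_eq_true_eq]
        constructor
        · rintro ⟨hatt, hval⟩
          by_cases hq0 : q = (i0, j0)
          · rw [if_pos hq0] at hval; exact absurd hval (by norm_num)
          · rw [if_neg hq0] at hval
            by_cases hz : pvOrig orig q = 1 ∧ pvAttB P q
            · rw [if_pos hz] at hval; exact absurd hval (by norm_num)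
            · rw [if_neg hz] at hval
              have ho : pvOrig orig q = 1 := hval
              have hna : ¬ pvAttB P q := fun ha => hz ⟨ho, ha⟩
              have hmem : q ∈ rest := by
                by_contra hnm
                have hnotc : q ∉ (i0, j0) :: rest := by simp [hq0, hnm]
                exact hna (hdone q h1 h2 hnotc ho)
              exact ⟨hmem, ho, hna, hatt⟩
        · rintro ⟨hmem, ho, hna, hatt⟩
          have hq0 : q ≠ (i0, j0) := fun he => hq0notin (he ▸ hmem)
          rw [if_neg hq0, if_neg (fun hz => hna hz.2), ho]
          exact ⟨hatt, rfl⟩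
      -- Zc with the new pivot list
      have hZc : (pvZc orig P' rest : Int) = (pvZc orig P rest : Int) + (rest.countP newp : Int) := by
        have horb := pvCountP_orb rest
          (fun q => decide (pvOrig orig q = 1 ∧ pvAttB P q)) newp
          (by intro q _; rw [hnewp]; simp only [decide_eq_true_eq]
              rintro ⟨⟨_, ha⟩, _, hna, _⟩; exact hna ha)
        have hcg : pvZc orig P' rest = rest.countP
            (fun q => decide (pvOrig orig q = 1 ∧ pvAttB P q) || newp q) := by
          apply List.countP_congr
          intro q _
          rw [hnewp]
          simp only [hP'def, decide_eq_true_eq, Bool.or_eq_true]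
          rw [pvAttB_append]
          constructor
          · rintro ⟨ho, hPa | ha⟩
            · exact Or.inl ⟨ho, hPa⟩
            · by_cases hPq : pvAttB P q
              · exact Or.inl ⟨ho, hPq⟩
              · exact Or.inr ⟨ho, hPq, ha⟩
          · rintro (⟨ho, hPa⟩ | ⟨ho, _, ha⟩)
            · exact ⟨ho, Or.inl hPa⟩
            · exact ⟨ho, Or.inr ha⟩
        rw [hcg, horb, pvZc]
        push_cast
        ring
      -- new invariants for the recursive call
      have hchar' : ∀ q : Nat × Nat, q.1 < orig.length → q.2 < (orig.headD []).length →
          pvGetA st1.1 q.1 q.2 = if pvOrig orig q = 1 ∧ pvAttB P' q then 0 else pvOrig orig q := by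
        intro q h1 h2
        have hmem : q ∈ pvCells orig.length (orig.headD []).length := (pvMem_cells _ _ q).2 ⟨h1, h2⟩
        have hP'att : pvAttB P' q ↔ pvAttB P q ∨ pvAtt (i0, j0) q := pvAttB_append P (i0, j0) q
        rw [hst1, runb q, hm0 q h1 h2]
        by_cases hq0 : q = (i0, j0)
        · rw [if_pos hq0, if_neg (by rintro ⟨_, _, hvv⟩; exact absurd hvv (by norm_num)),
              if_pos ⟨by rw [hq0]; exact horig, hP'att.2 (Or.inr (by rw [hq0]; exact pvAtt_self (i0, j0)))⟩]
        · rw [if_neg hq0]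
          by_cases hz : pvOrig orig q = 1 ∧ pvAttB P q
          · rw [if_pos hz, if_neg (by rintro ⟨_, _, hvv⟩; exact absurd hvv (by norm_num)),
                if_pos ⟨hz.1, hP'att.2 (Or.inl hz.2)⟩]
          · rw [if_neg hz]
            by_cases hA : pvAtt (i0, j0) q ∧ pvOrig orig q = 1
            · rw [if_pos ⟨hmem, hA.1, hA.2⟩, if_pos ⟨hA.2, hP'att.2 (Or.inr hA.1)⟩]
            · rw [if_neg (by rintro ⟨_, ha, hv⟩; exact hA ⟨ha, hv⟩),
                  if_neg (by rintro ⟨ho, hP⟩; rcases hP'att.1 hP with hPa | ha; exacts [hz ⟨ho, hPa⟩, hA ⟨ha, ho⟩])]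
      have hdone' : ∀ q : Nat × Nat, q.1 < orig.length → q.2 < (orig.headD []).length →
          q ∉ rest → pvOrig orig q = 1 → pvAttB P' q := by
        intro q h1 h2 hq ho
        by_cases hq0 : q = (i0, j0)
        · subst hq0; exact (pvAttB_append P _ _).2 (Or.inr (pvAtt_self (i0, j0)))
        · exact (pvAttB_append P _ _).2 (Or.inl (hdone q h1 h2 (by simp [hq0, hq]) ho))
      have hsh1 : pvShape orig st1.1 := ⟨runl ▸ hsh0.1, fun k => (runr k) ▸ hsh0.2 k⟩
      have hb' : ∀ q ∈ rest, q.1 < orig.length ∧ q.2 < (orig.headD []).length :=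
        fun q hq => hb q (by simp [hq])
      have ihh := ih P' st1.1 (s + (rest.countP newp : Int)) hnd.of_cons hb' hsh1 hchar' hdone'
      have hst1eq : st1 = (st1.1, s + (rest.countP newp : Int)) := by
        have h2 : st1.2 = s + (rest.countP newp : Int) := by rw [hst1, runc, ← hcnt]
        rw [← h2]
      have hpiv : pvPiv orig P ((i0, j0) :: rest) = pvPiv orig P' rest := by
        rw [pvPiv, List.foldl_cons, if_pos ⟨horig, hnatt⟩]
        rfl
      have hzc0 : pvZc orig P ((i0, j0) :: rest) = pvZc orig P rest := by
        rw [pvZc, List.countP_cons, pvZc]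
        simp [hnatt]
      have hqc : pvQc orig ((i0, j0) :: rest) = pvQc orig rest + 1 := by
        rw [pvQc, List.countP_cons, pvQc]
        simp [pvOrig] at horig ⊢
        simp [horig]
      rw [hst1eq, hpiv, hzc0, hqc]
      have hlenP' : (P'.length : Int) = (P.length : Int) + 1 := by simp [hP'def]
      omega
    · -- skip: the cell holds no live queen
      have hstep : pvStepA orig.length (orig.headD []).length (m, s) (i0, j0) = (m, s) := by
        rw [pvStepA, if_neg hg]
      rw [hstep]
      by_cases horig : pvOrig orig (i0, j0) = 1
      · -- a queen already captured: it must be attacked by P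
        have hatt : pvAttB P (i0, j0) := by
          by_contra hna
          rw [hcq0, if_neg (fun hz => hna hz.2)] at hg
          exact hg horig
        have ihh := ih P m s hnd.of_cons (fun q hq => hb q (by simp [hq])) hsh hchar
          (by intro q h1 h2 hq ho
              by_cases hq0 : q = (i0, j0)
              · subst hq0; exact hatt
              · exact hdone q h1 h2 (by simp [hq0, hq]) ho)
        have hpiv : pvPiv orig P ((i0, j0) :: rest) = pvPiv orig P rest := by
          rw [pvPiv, List.foldl_cons, if_neg (by rintro ⟨_, hna⟩; exact hna hatt)]
          rfl
        have hzc : pvZc orig P ((i0, j0) :: rest) = pvZc orig P rest + 1 := by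
          rw [pvZc, List.countP_cons, pvZc]
          simp [horig, hatt]
        have hqc : pvQc orig ((i0, j0) :: rest) = pvQc orig rest + 1 := by
          rw [pvQc, List.countP_cons, pvQc]
          simp [horig]
        rw [hpiv, hzc, hqc]
        omega
      · -- no queen at the cell
        have ihh := ih P m s hnd.of_cons (fun q hq => hb q (by simp [hq])) hsh hchar
          (by intro q h1 h2 hq ho
              by_cases hq0 : q = (i0, j0)
              · subst hq0; exact absurd ho horig
              · exact hdone q h1 h2 (by simp [hq0, hq]) ho)
        have hpiv : pvPiv orig P ((i0, j0) :: rest) = pvPiv orig P rest := by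
          rw [pvPiv, List.foldl_cons, if_neg (by rintro ⟨ho, _⟩; exact horig ho)]
          rfl
        have hzc : pvZc orig P ((i0, j0) :: rest) = pvZc orig P rest := by
          rw [pvZc, List.countP_cons, pvZc]
          simp [horig]
        have hqc : pvQc orig ((i0, j0) :: rest) = pvQc orig rest := by
          rw [pvQc, List.countP_cons, pvQc]
          simp [horig]
        rw [hpiv, hzc, hqc]
        omega

-- ---- B-side ----
theorem pvAtt_iff (p q : Nat × Nat) : pvAtt p q ↔
    (q.1 = p.1 ∨ q.2 = p.2 ∨ (q.1 : Int) + q.2 = (p.1 : Int) + p.2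
      ∨ (q.1 : Int) - q.2 = (p.1 : Int) - p.2) := by
  constructor
  · rintro (⟨h, _⟩ | ⟨h, _⟩ | h | h)
    exacts [Or.inl h, Or.inr (Or.inl h), Or.inr (Or.inr (Or.inl h)), Or.inr (Or.inr (Or.inr h))]
  · rintro (h | h | h | h)
    · by_cases h2 : q.2 = p.2
      · exact Or.inr (Or.inr (Or.inl (by omega)))
      · exact Or.inl ⟨h, h2⟩
    · by_cases h2 : q.1 = p.1
      · exact Or.inr (Or.inr (Or.inl (by omega)))
      · exact Or.inr (Or.inl ⟨h, h2⟩)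
    · exact Or.inr (Or.inr (Or.inl h))
    · exact Or.inr (Or.inr (Or.inr h))

theorem pvB_run (orig : List (List Int)) :
    ∀ (rest : List (Nat × Nat)) (P : List (Nat × Nat)) (t p : Int)
      (R C D1 : PySem.Set Nat) (D2 : PySem.Set Int),
    (∀ x : Nat, x ∈ R ↔ ∃ q ∈ P, q.1 = x) →
    (∀ x : Nat, x ∈ C ↔ ∃ q ∈ P, q.2 = x) →
    (∀ x : Nat, x ∈ D1 ↔ ∃ q ∈ P, q.1 + q.2 = x) →
    (∀ x : Int, x ∈ D2 ↔ ∃ q ∈ P, (q.1 : Int) - q.2 = x) →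
    (rest.foldl (pvStepB orig) (t, p, R, C, D1, D2)).1 = t + (pvQc orig rest : Int)
    ∧ (rest.foldl (pvStepB orig) (t, p, R, C, D1, D2)).2.1
        = p + ((pvPiv orig P rest).length : Int) - (P.length : Int) := by
  intro rest
  induction rest with
  | nil =>
    intro P t p R C D1 D2 _ _ _ _
    refine ⟨by simp [pvQc], by simp [pvPiv]⟩
  | cons q0 rest ih =>
    intro P t p R C D1 D2 hR hC hD1 hD2
    obtain ⟨i0, j0⟩ := q0
    rw [List.foldl_cons]
    by_cases hq : pvOrig orig (i0, j0) = 1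
    · by_cases hatt : pvAttB P (i0, j0)
      · -- queen, already attacked: no new pivot
        have hcnd : ¬ (¬ (PySem.Set.contains R i0 = true) ∧ ¬ (PySem.Set.contains C j0 = true)
            ∧ ¬ (PySem.Set.contains D1 (i0 + j0) = true)
            ∧ ¬ (PySem.Set.contains D2 ((i0 : Int) - (j0 : Int)) = true)) := by
          rintro ⟨n1, n2, n3, n4⟩
          obtain ⟨pp, hp, hap⟩ := hatt
          rcases (pvAtt_iff pp (i0, j0)).1 hap with h | h | h | h
          · exact n1 ((PySem.Set.contains_iff R i0).2 ((hR i0).2 ⟨pp, hp, h.symm⟩))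
          · exact n2 ((PySem.Set.contains_iff C j0).2 ((hC j0).2 ⟨pp, hp, h.symm⟩))
          · exact n3 ((PySem.Set.contains_iff D1 (i0 + j0)).2 ((hD1 (i0 + j0)).2 ⟨pp, hp, by omega⟩))
          · exact n4 ((PySem.Set.contains_iff D2 ((i0 : Int) - j0)).2 ((hD2 _).2 ⟨pp, hp, by omega⟩))
        have hstep : pvStepB orig (t, p, R, C, D1, D2) (i0, j0) = (t + 1, p, R, C, D1, D2) := by
          simp only [pvStepB]
          rw [if_pos hq, if_neg hcnd]
        rw [hstep]
        obtain ⟨ih1, ih2⟩ := ih P (t + 1) p R C D1 D2 hR hC hD1 hD2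
        have hpiv : pvPiv orig P ((i0, j0) :: rest) = pvPiv orig P rest := by
          rw [pvPiv, List.foldl_cons, if_neg (by rintro ⟨_, hna⟩; exact hna hatt)]
          rfl
        have hqc : pvQc orig ((i0, j0) :: rest) = pvQc orig rest + 1 := by
          rw [pvQc, List.countP_cons, pvQc]
          simp [hq]
        rw [hpiv, hqc]
        refine ⟨by rw [ih1]; push_cast; ring, by rw [ih2]⟩
      · -- new pivot
        have hcnd : (¬ (PySem.Set.contains R i0 = true) ∧ ¬ (PySem.Set.contains C j0 = true)
            ∧ ¬ (PySem.Set.contains D1 (i0 + j0) = true)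
            ∧ ¬ (PySem.Set.contains D2 ((i0 : Int) - (j0 : Int)) = true)) := by
          refine ⟨?_, ?_, ?_, ?_⟩
          · intro hc
            obtain ⟨pp, hp, he⟩ := (hR i0).1 ((PySem.Set.contains_iff R i0).1 hc)
            exact hatt ⟨pp, hp, (pvAtt_iff pp (i0, j0)).2 (Or.inl he.symm)⟩
          · intro hc
            obtain ⟨pp, hp, he⟩ := (hC j0).1 ((PySem.Set.contains_iff C j0).1 hc)
            exact hatt ⟨pp, hp, (pvAtt_iff pp (i0, j0)).2 (Or.inr (Or.inl he.symm))⟩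
          · intro hc
            obtain ⟨pp, hp, he⟩ := (hD1 (i0 + j0)).1 ((PySem.Set.contains_iff D1 _).1 hc)
            exact hatt ⟨pp, hp, (pvAtt_iff pp (i0, j0)).2 (Or.inr (Or.inr (Or.inl (by omega))))⟩
          · intro hc
            obtain ⟨pp, hp, he⟩ := (hD2 ((i0 : Int) - j0)).1 ((PySem.Set.contains_iff D2 _).1 hc)
            exact hatt ⟨pp, hp, (pvAtt_iff pp (i0, j0)).2 (Or.inr (Or.inr (Or.inr (by omega))))⟩
        have hstep : pvStepB orig (t, p, R, C, D1, D2) (i0, j0)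
            = (t + 1, p + 1, PySem.Set.add R i0, PySem.Set.add C j0,
               PySem.Set.add D1 (i0 + j0), PySem.Set.add D2 ((i0 : Int) - (j0 : Int))) := by
          simp only [pvStepB]
          rw [if_pos hq, if_pos hcnd]
        rw [hstep]
        have hR' : ∀ x : Nat, x ∈ PySem.Set.add R i0 ↔ ∃ q ∈ P ++ [(i0, j0)], q.1 = x := by
          intro x
          rw [PySem.Set.mem_add]
          constructor
          · rintro (hx | he)
            · obtain ⟨q, hq', e⟩ := (hR x).1 hx
              exact ⟨q, List.mem_append_left _ hq', e⟩
            · exact ⟨(i0, j0), List.mem_append_right _ (by simp), he.symm⟩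
          · rintro ⟨q, hq', e⟩
            rcases List.mem_append.1 hq' with h | h
            · exact Or.inl ((hR x).2 ⟨q, h, e⟩)
            · simp only [List.mem_singleton] at h
              subst h
              exact Or.inr e.symm
        have hC' : ∀ x : Nat, x ∈ PySem.Set.add C j0 ↔ ∃ q ∈ P ++ [(i0, j0)], q.2 = x := by
          intro x
          rw [PySem.Set.mem_add]
          constructor
          · rintro (hx | he)
            · obtain ⟨q, hq', e⟩ := (hC x).1 hx
              exact ⟨q, List.mem_append_left _ hq', e⟩
            · exact ⟨(i0, j0), List.mem_append_right _ (by simp), he.symm⟩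
          · rintro ⟨q, hq', e⟩
            rcases List.mem_append.1 hq' with h | h
            · exact Or.inl ((hC x).2 ⟨q, h, e⟩)
            · simp only [List.mem_singleton] at h
              subst h
              exact Or.inr e.symm
        have hD1' : ∀ x : Nat, x ∈ PySem.Set.add D1 (i0 + j0) ↔ ∃ q ∈ P ++ [(i0, j0)], q.1 + q.2 = x := by
          intro x
          rw [PySem.Set.mem_add]
          constructor
          · rintro (hx | he)
            · obtain ⟨q, hq', e⟩ := (hD1 x).1 hx
              exact ⟨q, List.mem_append_left _ hq', e⟩
            · exact ⟨(i0, j0), List.mem_append_right _ (by simp), he.symm⟩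
          · rintro ⟨q, hq', e⟩
            rcases List.mem_append.1 hq' with h | h
            · exact Or.inl ((hD1 x).2 ⟨q, h, e⟩)
            · simp only [List.mem_singleton] at h
              subst h
              exact Or.inr e.symm
        have hD2' : ∀ x : Int, x ∈ PySem.Set.add D2 ((i0 : Int) - (j0 : Int)) ↔ ∃ q ∈ P ++ [(i0, j0)], (q.1 : Int) - q.2 = x := by
          intro x
          rw [PySem.Set.mem_add]
          constructor
          · rintro (hx | he)
            · obtain ⟨q, hq', e⟩ := (hD2 x).1 hx
              exact ⟨q, List.mem_append_left _ hq', e⟩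
            · exact ⟨(i0, j0), List.mem_append_right _ (by simp), he.symm⟩
          · rintro ⟨q, hq', e⟩
            rcases List.mem_append.1 hq' with h | h
            · exact Or.inl ((hD2 x).2 ⟨q, h, e⟩)
            · simp only [List.mem_singleton] at h
              subst h
              exact Or.inr e.symm
        obtain ⟨ih1, ih2⟩ := ih (P ++ [(i0, j0)]) (t + 1) (p + 1) _ _ _ _ hR' hC' hD1' hD2'
        have hpiv : pvPiv orig P ((i0, j0) :: rest) = pvPiv orig (P ++ [(i0, j0)]) rest := by
          rw [pvPiv, List.foldl_cons, if_pos ⟨hq, hatt⟩]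
          rfl
        have hqc : pvQc orig ((i0, j0) :: rest) = pvQc orig rest + 1 := by
          rw [pvQc, List.countP_cons, pvQc]
          simp [hq]
        rw [hpiv, hqc]
        refine ⟨by rw [ih1]; push_cast; ring, by rw [ih2]; simp; ring⟩
    · -- no queen here
      have hstep : pvStepB orig (t, p, R, C, D1, D2) (i0, j0) = (t, p, R, C, D1, D2) := by
        simp only [pvStepB]
        rw [if_neg hq]
      rw [hstep]
      obtain ⟨ih1, ih2⟩ := ih P t p R C D1 D2 hR hC hD1 hD2
      have hpiv : pvPiv orig P ((i0, j0) :: rest) = pvPiv orig P rest := by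
        rw [pvPiv, List.foldl_cons, if_neg (by rintro ⟨ho, _⟩; exact hq ho)]
        rfl
      have hqc : pvQc orig ((i0, j0) :: rest) = pvQc orig rest := by
        rw [pvQc, List.countP_cons, pvQc]
        simp [hq]
      rw [hpiv, hqc]
      exact ⟨ih1, ih2⟩

theorem pvA_closed (orig : List (List Int)) (hpre : Pre_contar_Atacados orig) :
    contar_Atacados orig
      = (pvQc orig (pvCells orig.length (orig.headD []).length) : Int)
        - ((pvPiv orig [] (pvCells orig.length (orig.headD []).length)).length : Int) := by
  have hchar0 : ∀ q : Nat × Nat, q.1 < orig.length → q.2 < (orig.headD []).length →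
      pvGetA orig q.1 q.2 = if pvOrig orig q = 1 ∧ pvAttB [] q then 0 else pvOrig orig q := by
    intro q _ _
    rw [if_neg (by rintro ⟨_, p, hp, _⟩; simp at hp)]
    rfl
  have hdone0 : ∀ q : Nat × Nat, q.1 < orig.length → q.2 < (orig.headD []).length →
      q ∉ pvCells orig.length (orig.headD []).length → pvOrig orig q = 1 → pvAttB [] q :=
    fun q h1 h2 hq _ => absurd ((pvMem_cells _ _ q).2 ⟨h1, h2⟩) hq
  have hmain := pvMain orig hpre (pvCells orig.length (orig.headD []).length) [] orig 0
    (pvNodup_cells _ _) (fun q hq => (pvMem_cells _ _ q).1 hq) ⟨rfl, fun _ => rfl⟩ hchar0 hdone0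
  have hzc : pvZc orig [] (pvCells orig.length (orig.headD []).length) = 0 := by
    simp [pvZc, pvAttB]
  have hA : contar_Atacados orig
      = ((pvCells orig.length (orig.headD []).length).foldl
          (pvStepA orig.length (orig.headD []).length) (orig, 0)).2 := by
    unfold contar_Atacados
    rw [pvFold_cells]
    refine congrArg Prod.snd ?_
    apply PySem.List.foldl_congr_mem
    intro acc q _
    by_cases hg : pvGetA acc.1 q.1 q.2 = 1
    · rw [pvStepA, if_pos hg, if_pos hg]
      exact pvFold_cells _ _ _ _
    · rw [pvStepA, if_neg hg, if_neg hg]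
  rw [hzc] at hmain
  rw [← hA] at hmain
  simp only [List.length_nil, Nat.cast_zero, add_zero, zero_add] at hmain
  omega

theorem pvB_closed (orig : List (List Int)) :
    contar_Atacados_alt orig
      = (pvQc orig (pvCells orig.length (orig.headD []).length) : Int)
        - ((pvPiv orig [] (pvCells orig.length (orig.headD []).length)).length : Int) := by
  obtain ⟨h1, h2⟩ := pvB_run orig (pvCells orig.length (orig.headD []).length) [] 0 0
    PySem.Set.empty PySem.Set.empty PySem.Set.empty PySem.Set.empty
    (by intro x; simp [PySem.Set.empty]) (by intro x; simp [PySem.Set.empty])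
    (by intro x; simp [PySem.Set.empty]) (by intro x; simp [PySem.Set.empty])
  have hnc : (if orig.isEmpty then 0 else (orig.headD []).length) = (orig.headD []).length := by
    cases orig <;> simp
  simp only [contar_Atacados_alt]
  rw [hnc, pvFold_cells]
  show ((pvCells orig.length (orig.headD []).length).foldl (pvStepB orig)
        ((0 : Int), (0 : Int), (PySem.Set.empty : PySem.Set Nat), (PySem.Set.empty : PySem.Set Nat),
         (PySem.Set.empty : PySem.Set Nat), (PySem.Set.empty : PySem.Set Int))).1
      - ((pvCells orig.length (orig.headD []).length).foldl (pvStepB orig)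
        ((0 : Int), (0 : Int), (PySem.Set.empty : PySem.Set Nat), (PySem.Set.empty : PySem.Set Nat),
         (PySem.Set.empty : PySem.Set Nat), (PySem.Set.empty : PySem.Set Int))).2.1
      = (pvQc orig (pvCells orig.length (orig.headD []).length) : Int)
        - ((pvPiv orig [] (pvCells orig.length (orig.headD []).length)).length : Int)
  rw [h1, h2]
  simp

-- ===== VERDICT (by name: the statement is the Claim_ definition above) =====
theorem contar_Atacados_spec : Claim_equal_contar_Atacados := by
  intro matriz _ hpre
  unfold Spec_contar_Atacados
  rw [pvA_closed matriz hpre, pvB_closed matriz]
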